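-- pv_equiv track=rewrite | github.com/kaonmir/Festa | src/Programmers/코딩테스트 실전 대비 모의고사/1차/2.py | solution
-- ===== SOURCE A (Python) =====
-- def solution(want, number, discount):
--     answer = 0
--     cart = {product: -int(num) for (product, num) in zip(want, number)}
--
--     for day, product in enumerate(discount):
--         if day < 10:
--             if product in cart:
--                 cart[product] += 1
--             if day == 9 and all(v >= 0 for v in cart.values()):
--                 answer += 1
--             continue
--
--         expiredProduct = discount[day - 10]
--         if expiredProduct in cart:
--             cart[expiredProduct] -= 1
--         if product in cart:
--             cart[product] += 1
--
--         if all(v >= 0 for v in cart.values()):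
--             answer += 1
--
--     return answer
-- ===== SOURCE B (Python) =====
-- def solution(want, number, discount):
--     # Sliding 10-day window; instead of rescanning the whole cart every day,
--     # keep a running count of satisfied products and adjust it only on
--     # threshold crossings.
--     need = dict(zip(want, number))
--     have = {p: 0 for p in need}
--     satisfied = sum(1 for p in need if have[p] >= need[p])
--     total = len(need)
--     answer = 0
--     for day in range(len(discount)):
--         p = discount[day]
--         if p in need:
--             have[p] += 1
--             if have[p] == need[p]:
--                 satisfied += 1
--         if day >= 10:
--             q = discount[day - 10]
--             if q in need:
--                 have[q] -= 1
--                 if have[q] == need[q] - 1: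
--                     satisfied -= 1
--         if day >= 9 and satisfied == total:
--             answer += 1
--     return answer
-- ===== Notes on version B (the rewrite author's own statement) =====
-- stated objective: faster
-- what changed: A rescans every cart entry with all(v >= 0 ...) after each day; B keeps a running count of satisfied products and updates it only on threshold crossings, checking a single integer per window.
import Mathlib
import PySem

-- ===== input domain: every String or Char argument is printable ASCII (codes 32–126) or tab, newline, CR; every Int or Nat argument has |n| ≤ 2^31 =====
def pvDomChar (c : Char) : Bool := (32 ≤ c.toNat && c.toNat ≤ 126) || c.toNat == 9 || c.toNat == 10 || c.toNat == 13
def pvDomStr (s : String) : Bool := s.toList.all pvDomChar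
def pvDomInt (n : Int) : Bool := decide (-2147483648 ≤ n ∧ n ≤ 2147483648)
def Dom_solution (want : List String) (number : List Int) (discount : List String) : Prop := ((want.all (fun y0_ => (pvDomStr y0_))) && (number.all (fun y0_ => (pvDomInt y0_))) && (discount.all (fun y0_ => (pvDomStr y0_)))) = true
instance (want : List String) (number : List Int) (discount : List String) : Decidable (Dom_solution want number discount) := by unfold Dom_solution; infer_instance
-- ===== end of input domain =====

-- B replaces A's per-day full rescan of the cart with a running count of satisfied
-- products updated on threshold crossings (objective: faster by a constant factor in
-- the cart size). Equivalence of return values is proved on all inputs.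

-- ===== PORT A =====
def solution (want : List String) (number : List Int) (discount : List String) : Int :=
  -- cart = {product: -int(num) for (product, num) in zip(want, number)}
  let cart : PySem.Dict String Int :=
    (List.zip want number).foldl (fun d pn => d.insert pn.1 (-pn.2)) PySem.Dict.empty
  -- for day, product in enumerate(discount): …
  let st :=
    (PySem.List.enumerate discount).foldl
      (fun (st : Int × PySem.Dict String Int) e =>
        let answer := st.1
        let cart := st.2
        let day := e.1
        let product := e.2
        if day < 10 then
          -- cart[product] += 1 is guarded by 'product in cart', so modify's default is never used
          let cart := if cart.contains product then cart.modify product 0 (· + 1) else cart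
          let answer :=
            if day = 9 ∧ (cart.values.all (fun v => decide (0 ≤ v))) then answer + 1 else answer
          (answer, cart)
        else
          let expiredProduct := PySem.List.pyGetD discount (day - 10) ""  -- 0 ≤ day-10 < len, in range
          let cart :=
            if cart.contains expiredProduct then cart.modify expiredProduct 0 (· - 1) else cart
          let cart := if cart.contains product then cart.modify product 0 (· + 1) else cart
          let answer :=
            if (cart.values.all (fun v => decide (0 ≤ v))) then answer + 1 else answer
          (answer, cart))
      (0, cart)
  st.1

-- ===== PORT B =====
def solution_alt (want : List String) (number : List Int) (discount : List String) : Int :=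
  -- need = dict(zip(want, number)); have = {p: 0 for p in need}
  let need : PySem.Dict String Int :=
    (List.zip want number).foldl (fun d pn => d.insert pn.1 pn.2) PySem.Dict.empty
  let hv : PySem.Dict String Int :=
    need.keys.foldl (fun d p => d.insert p 0) PySem.Dict.empty
  -- satisfied = sum(1 for p in need if have[p] >= need[p])
  let satisfied : Int :=
    (need.keys.map (fun p => if need.getD p 0 ≤ hv.getD p 0 then (1 : Int) else 0)).sum
  let total : Int := (need.size : Int)
  -- for day in range(len(discount)): …
  let st :=
    (PySem.List.pyRange 0 (discount.length : Int) 1).foldl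
      (fun (st : PySem.Dict String Int × Int × Int) day =>
        let p := PySem.List.pyGetD discount day ""          -- p = discount[day], in range
        let s1 :=
          if need.contains p then
            let hv1 := st.1.modify p 0 (· + 1)
            let sat1 := if hv1.getD p 0 = need.getD p 0 then st.2.1 + 1 else st.2.1
            (hv1, sat1)
          else (st.1, st.2.1)
        let s2 :=
          if 10 ≤ day then
            let q := PySem.List.pyGetD discount (day - 10) ""  -- q = discount[day-10], in range
            if need.contains q then
              let hv2 := s1.1.modify q 0 (· - 1)
              let sat2 := if hv2.getD q 0 = need.getD q 0 - 1 then s1.2 - 1 else s1.2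
              (hv2, sat2)
            else s1
          else s1
        let answer := if 9 ≤ day ∧ s2.2 = total then st.2.2 + 1 else st.2.2
        (s2.1, s2.2, answer))
      (hv, satisfied, 0)
  st.2.2

-- ===== PRECONDITION & SPEC =====
def Spec_solution (want : List String) (number : List Int) (discount : List String) (out : Int) : Prop := out = solution_alt want number discount
instance (want : List String) (number : List Int) (discount : List String) (out : Int) : Decidable (Spec_solution want number discount out) := by unfold Spec_solution; infer_instance

-- ===== CLAIM (what is proved, stated in full; the proofs are below) =====
def Claim_equal_solution : Prop := ∀ (want : List String) (number : List Int) (discount : List String), Dom_solution want number discount → Spec_solution want number discount (solution want number discount)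

-- ===== LEMMAS AND PROOFS =====

-- A's loop body, named for the proofs (definitionally the lambda in `solution`)
def stepA (discount : List String) (st : Int × PySem.Dict String Int) (e : Int × String) :
    Int × PySem.Dict String Int :=
  let answer := st.1
  let cart := st.2
  let day := e.1
  let product := e.2
  if day < 10 then
    let cart := if cart.contains product then cart.modify product 0 (· + 1) else cart
    let answer :=
      if day = 9 ∧ (cart.values.all (fun v => decide (0 ≤ v))) then answer + 1 else answer
    (answer, cart)
  else
    let expiredProduct := PySem.List.pyGetD discount (day - 10) ""
    let cart :=
      if cart.contains expiredProduct then cart.modify expiredProduct 0 (· - 1) else cart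
    let cart := if cart.contains product then cart.modify product 0 (· + 1) else cart
    let answer :=
      if (cart.values.all (fun v => decide (0 ≤ v))) then answer + 1 else answer
    (answer, cart)

-- B's loop body, named for the proofs (definitionally the lambda in `solution_alt`)
def stepB (need : PySem.Dict String Int) (discount : List String)
    (st : PySem.Dict String Int × Int × Int) (day : Int) :
    PySem.Dict String Int × Int × Int :=
  let p := PySem.List.pyGetD discount day ""
  let s1 :=
    if need.contains p then
      let hv1 := st.1.modify p 0 (· + 1)
      let sat1 := if hv1.getD p 0 = need.getD p 0 then st.2.1 + 1 else st.2.1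
      (hv1, sat1)
    else (st.1, st.2.1)
  let s2 :=
    if 10 ≤ day then
      let q := PySem.List.pyGetD discount (day - 10) ""
      if need.contains q then
        let hv2 := s1.1.modify q 0 (· - 1)
        let sat2 := if hv2.getD q 0 = need.getD q 0 - 1 then s1.2 - 1 else s1.2
        (hv2, sat2)
      else s1
    else s1
  let answer := if 9 ≤ day ∧ s2.2 = (need.size : Int) then st.2.2 + 1 else st.2.2
  (s2.1, s2.2, answer)

def needD (want : List String) (number : List Int) : PySem.Dict String Int :=
  (List.zip want number).foldl (fun d pn => d.insert pn.1 pn.2) PySem.Dict.empty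

def cartD (want : List String) (number : List Int) : PySem.Dict String Int :=
  (List.zip want number).foldl (fun d pn => d.insert pn.1 (-pn.2)) PySem.Dict.empty

def hvD (want : List String) (number : List Int) : PySem.Dict String Int :=
  (needD want number).keys.foldl (fun d p => d.insert p 0) PySem.Dict.empty

def satD (want : List String) (number : List Int) : Int :=
  ((needD want number).keys.map
    (fun p => if (needD want number).getD p 0 ≤ (hvD want number).getD p 0 then (1 : Int) else 0)).sum

lemma solution_eq (want : List String) (number : List Int) (discount : List String) :
    solution want number discount =
      ((PySem.List.enumerate discount).foldl (stepA discount) (0, cartD want number)).1 := rfl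

lemma solution_alt_eq (want : List String) (number : List Int) (discount : List String) :
    solution_alt want number discount =
      ((PySem.List.pyRange 0 (discount.length : Int) 1).foldl
        (stepB (needD want number) discount) (hvD want number, satD want number, 0)).2.2 := rfl

-- The simulation invariant between A's state (answer, cart) and B's state (have, sat, answer)
def SimInv (need : PySem.Dict String Int) (sA : Int × PySem.Dict String Int)
    (sB : PySem.Dict String Int × Int × Int) : Prop :=
  sA.1 = sB.2.2 ∧ sA.2.keys = need.keys ∧
  (∀ k, sA.2.getD k 0 = sB.1.getD k 0 - need.getD k 0) ∧
  sB.2.1 = ((need.keys.countP (fun k => decide (need.getD k 0 ≤ sB.1.getD k 0))) : Int)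

lemma countP_update_int (l : List String) (hnd : l.Nodup) (p : String) (hp : p ∈ l)
    (f f' : String → Bool) (hag : ∀ k ∈ l, k ≠ p → f' k = f k) :
    ((l.countP f') : Int) =
      (l.countP f : Int) + ((if f' p then (1:Int) else 0) - (if f p then (1:Int) else 0)) := by
  induction l with
  | nil => simp at hp
  | cons x l ih =>
    have hnd' := List.nodup_cons.mp hnd
    by_cases hxp : x = p
    · subst hxp
      have hcong : l.countP f' = l.countP f :=
        List.countP_congr (fun k hk => by
          rw [hag k (List.mem_cons_of_mem _ hk) (fun h => hnd'.1 (h ▸ hk))])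
      simp only [List.countP_cons, hcong]
      push_cast
      split_ifs <;> omega
    · have hp' : p ∈ l := by
        rcases List.mem_cons.mp hp with h | h
        · exact absurd h.symm hxp
        · exact h
      have hx : f' x = f x := hag x List.mem_cons_self hxp
      have hih := ih hnd'.2 hp' (fun k hk hkp => hag k (List.mem_cons_of_mem _ hk) hkp)
      simp only [List.countP_cons, hx]
      push_cast at hih ⊢
      split_ifs at hih ⊢ <;> omega

-- updating `sat` on a threshold crossing keeps it equal to the count of satisfied products
lemma sat_step (need hv : PySem.Dict String Int) (sat : Int) (hnd : need.keys.Nodup)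
    (hsat : sat = ((need.keys.countP (fun k => decide (need.getD k 0 ≤ hv.getD k 0))) : Int))
    (p : String) (hp : p ∈ need.keys) (f : Int → Int) (c : Int) (hf : ∀ x, f x = x + c) :
    sat + ((if need.getD p 0 ≤ hv.getD p 0 + c then (1:Int) else 0)
           - (if need.getD p 0 ≤ hv.getD p 0 then (1:Int) else 0)) =
      ((need.keys.countP
        (fun k => decide (need.getD k 0 ≤ (hv.modify p 0 f).getD k 0))) : Int) := by
  rw [countP_update_int need.keys hnd p hp
      (fun k => decide (need.getD k 0 ≤ hv.getD k 0))
      (fun k => decide (need.getD k 0 ≤ (hv.modify p 0 f).getD k 0))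
      (fun k _ hkp => by simp [PySem.Dict.getD_modify, hkp])]
  rw [hsat]
  simp only [PySem.Dict.getD_modify, decide_eq_true_eq, hf]
  split_ifs <;> omega

lemma keys_modify_mem (d : PySem.Dict String Int) (p : String) (hp : p ∈ d.keys) (f : Int → Int) :
    (d.modify p 0 f).keys = d.keys := by
  rw [PySem.Dict.keys_modify]
  exact PySem.Dict.keys_insert_of_contains d _ ((PySem.Dict.contains_iff_mem_keys d p).mpr hp)

-- "all cart values ≥ 0" ⟺ "sat = total"
lemma cond_iff (need cart hv : PySem.Dict String Int) (sat : Int) (hnd : need.keys.Nodup)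
    (hkeys : cart.keys = need.keys)
    (hval : ∀ k, cart.getD k 0 = hv.getD k 0 - need.getD k 0)
    (hsat : sat = ((need.keys.countP (fun k => decide (need.getD k 0 ≤ hv.getD k 0))) : Int)) :
    ((cart.values.all (fun v => decide (0 ≤ v))) = true) ↔ sat = (need.size : Int) := by
  have hcnd : cart.keys.Nodup := hkeys ▸ hnd
  rw [PySem.Dict.values_eq_map_keys cart hcnd 0, List.all_map, List.all_eq_true]
  have hsize : need.size = need.keys.length := by
    simp [PySem.Dict.size, PySem.Dict.keys]
  rw [hsat, hsize, hkeys]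
  rw [Int.natCast_inj]
  rw [List.countP_eq_length]
  constructor
  · intro h k hk
    have := h k hk
    simp only [Function.comp, decide_eq_true_eq] at this ⊢
    have hv' := hval k
    omega
  · intro h k hk
    have := h k hk
    simp only [Function.comp, decide_eq_true_eq] at this ⊢
    have hv' := hval k
    omega

lemma step_inv (need : PySem.Dict String Int) (discount : List String) (hnd : need.keys.Nodup)
    (e : Int × String) (he1 : 0 ≤ e.1) (he2 : e.2 = PySem.List.pyGetD discount e.1 "")
    (sA : Int × PySem.Dict String Int) (sB : PySem.Dict String Int × Int × Int)
    (h : SimInv need sA sB) : SimInv need (stepA discount sA e) (stepB need discount sB e.1) := by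
  obtain ⟨hans, hkeys, hval, hsat⟩ := h
  have hcont : ∀ x, sA.2.contains x = need.contains x := by
    intro x
    rw [PySem.Dict.contains_eq_decide_mem_keys, PySem.Dict.contains_eq_decide_mem_keys, hkeys]
  unfold stepA stepB
  simp only [← he2, hcont]
  by_cases h10 : e.1 < 10
  · have h10' : ¬ (10 ≤ e.1) := by omega
    rw [if_pos h10, if_neg h10']
    by_cases hmem : e.2 ∈ need.keys
    · have hc : need.contains e.2 = true := (PySem.Dict.contains_iff_mem_keys _ _).mpr hmem
      simp only [hc, if_true]
      have hkeys2 : (sA.2.modify e.2 0 fun x => x + 1).keys = need.keys := by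
        rw [keys_modify_mem sA.2 e.2 (by rw [hkeys]; exact hmem) _, hkeys]
      have hval2 : ∀ k, (sA.2.modify e.2 0 fun x => x + 1).getD k 0
          = (sB.1.modify e.2 0 fun x => x + 1).getD k 0 - need.getD k 0 := by
        intro k
        rw [PySem.Dict.getD_modify, PySem.Dict.getD_modify]
        have h1 := hval k
        have h2 := hval e.2
        split_ifs with hk
        · subst hk; omega
        · omega
      have hsat2 : (if (sB.1.modify e.2 0 fun x => x + 1).getD e.2 0 = need.getD e.2 0
            then sB.2.1 + 1 else sB.2.1)
          = ↑(List.countP (fun k => decide (need.getD k 0 ≤ (sB.1.modify e.2 0 fun x => x + 1).getD k 0)) need.keys) := by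
        rw [← sat_step need sB.1 sB.2.1 hnd hsat e.2 hmem _ 1 (fun x => rfl),
          PySem.Dict.getD_modify, if_pos rfl]
        split_ifs <;> omega
      have hcnd := and_congr (show e.1 = 9 ↔ 9 ≤ e.1 by omega)
        (cond_iff need _ _ _ hnd hkeys2 hval2 hsat2)
      exact ⟨by rw [hans]; exact if_congr hcnd rfl rfl, hkeys2, hval2, hsat2⟩
    · have hc : need.contains e.2 = false := by
        rw [PySem.Dict.contains_eq_decide_mem_keys]; simpa using hmem
      simp only [hc, Bool.false_eq_true, if_false]
      have hcnd := and_congr (show e.1 = 9 ↔ 9 ≤ e.1 by omega)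
        (cond_iff need _ _ _ hnd hkeys hval hsat)
      exact ⟨by rw [hans]; exact if_congr hcnd rfl rfl, hkeys, hval, hsat⟩
  · have h10' : (10 : Int) ≤ e.1 := by omega
    rw [if_neg h10, if_pos h10']
    set q := PySem.List.pyGetD discount (e.1 - 10) "" with hq
    have hk1 : (if need.contains q = true then sA.2.modify q 0 fun x => x - 1 else sA.2).keys
        = need.keys := by
      split
      · next hcq =>
        rw [keys_modify_mem sA.2 q
          (by rw [hkeys]; exact (PySem.Dict.contains_iff_mem_keys _ _).mp hcq), hkeys]
      · exact hkeys
    have hcont1 : ∀ x,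
        (if need.contains q = true then sA.2.modify q 0 fun x => x - 1 else sA.2).contains x
          = need.contains x := by
      intro x
      rw [PySem.Dict.contains_eq_decide_mem_keys, hk1, ← PySem.Dict.contains_eq_decide_mem_keys]
    simp only [hcont1]
    by_cases hmq : q ∈ need.keys <;> by_cases hmp : e.2 ∈ need.keys
    · -- q ∈ need, e.2 ∈ need : both sides bump twice (in opposite orders)
      have hcq : need.contains q = true := (PySem.Dict.contains_iff_mem_keys _ _).mpr hmq
      have hcp : need.contains e.2 = true := (PySem.Dict.contains_iff_mem_keys _ _).mpr hmp
      simp only [hcq, hcp, if_true]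
      have hk2 : ((sA.2.modify q 0 fun x => x - 1).modify e.2 0 fun x => x + 1).keys
          = need.keys := by
        rw [keys_modify_mem _ e.2 (by
          rw [keys_modify_mem sA.2 q (by rw [hkeys]; exact hmq), hkeys]; exact hmp),
          keys_modify_mem sA.2 q (by rw [hkeys]; exact hmq), hkeys]
      have hval2 : ∀ k, ((sA.2.modify q 0 fun x => x - 1).modify e.2 0 fun x => x + 1).getD k 0
          = ((sB.1.modify e.2 0 fun x => x + 1).modify q 0 fun x => x - 1).getD k 0
            - need.getD k 0 := by
        intro k
        have v1 := hval k
        have v2 := hval e.2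
        have v3 := hval q
        simp only [PySem.Dict.getD_modify]
        by_cases h1 : k = e.2 <;> by_cases h2 : k = q
        · have h3 : e.2 = q := h1.symm.trans h2
          simp only [h1, h3] at v1 ⊢
          simp only [if_true]
          omega
        · have h3 : ¬ e.2 = q := fun h => h2 (h1.trans h)
          simp only [h1] at v1 ⊢
          simp only [if_true, if_neg h3, if_neg (show ¬ q = e.2 from fun h => h3 h.symm)]
          omega
        · have h3 : ¬ q = e.2 := fun h => h1 (h2.trans h)
          simp only [h2] at v1 ⊢
          simp only [if_true, if_neg h3, if_neg (show ¬ e.2 = q from fun h => h3 h.symm)]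
          omega
        · simp only [if_neg h1, if_neg h2]
          omega
      have hsat1 : (if (sB.1.modify e.2 0 fun x => x + 1).getD e.2 0 = need.getD e.2 0
            then sB.2.1 + 1 else sB.2.1)
          = ↑(List.countP (fun k => decide (need.getD k 0
              ≤ (sB.1.modify e.2 0 fun x => x + 1).getD k 0)) need.keys) := by
        rw [← sat_step need sB.1 sB.2.1 hnd hsat e.2 hmp _ 1 (fun x => rfl),
          PySem.Dict.getD_modify, if_pos rfl]
        split_ifs <;> omega
      have hsat2 : (if ((sB.1.modify e.2 0 fun x => x + 1).modify q 0 fun x => x - 1).getD q 0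
              = need.getD q 0 - 1
            then (if (sB.1.modify e.2 0 fun x => x + 1).getD e.2 0 = need.getD e.2 0
              then sB.2.1 + 1 else sB.2.1) - 1
            else (if (sB.1.modify e.2 0 fun x => x + 1).getD e.2 0 = need.getD e.2 0
              then sB.2.1 + 1 else sB.2.1))
          = ↑(List.countP (fun k => decide (need.getD k 0
              ≤ ((sB.1.modify e.2 0 fun x => x + 1).modify q 0 fun x => x - 1).getD k 0))
              need.keys) := by
        rw [← sat_step need _ _ hnd hsat1 q hmq _ (-1) (fun x => by omega),
          PySem.Dict.getD_modify, if_pos rfl]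
        split_ifs <;> omega
      have hcnd : ((((sA.2.modify q 0 fun x => x - 1).modify e.2 0 fun x => x + 1).values.all
            fun v => decide (0 ≤ v)) = true)
          ↔ (9 ≤ e.1 ∧ (if ((sB.1.modify e.2 0 fun x => x + 1).modify q 0 fun x => x - 1).getD q 0
              = need.getD q 0 - 1
            then (if (sB.1.modify e.2 0 fun x => x + 1).getD e.2 0 = need.getD e.2 0
              then sB.2.1 + 1 else sB.2.1) - 1
            else (if (sB.1.modify e.2 0 fun x => x + 1).getD e.2 0 = need.getD e.2 0
              then sB.2.1 + 1 else sB.2.1)) = (need.size : Int)) :=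
        ⟨fun hA => ⟨by omega, (cond_iff need _ _ _ hnd hk2 hval2 hsat2).mp hA⟩,
         fun hB => (cond_iff need _ _ _ hnd hk2 hval2 hsat2).mpr hB.2⟩
      exact ⟨by rw [hans]; exact if_congr hcnd rfl rfl, hk2, hval2, hsat2⟩
    · -- q ∈ need, e.2 ∉ need : only the expiring product is adjusted
      have hcq : need.contains q = true := (PySem.Dict.contains_iff_mem_keys _ _).mpr hmq
      have hcp : need.contains e.2 = false := by
        rw [PySem.Dict.contains_eq_decide_mem_keys]; simpa using hmp
      simp only [hcq, hcp, if_true, Bool.false_eq_true, if_false]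
      have hk2 : (sA.2.modify q 0 fun x => x - 1).keys = need.keys := by
        rw [keys_modify_mem sA.2 q (by rw [hkeys]; exact hmq), hkeys]
      have hval2 : ∀ k, (sA.2.modify q 0 fun x => x - 1).getD k 0
          = (sB.1.modify q 0 fun x => x - 1).getD k 0 - need.getD k 0 := by
        intro k
        have v1 := hval k
        have v3 := hval q
        simp only [PySem.Dict.getD_modify]
        split_ifs with h
        · rw [h]; omega
        · omega
      have hsat2 : (if (sB.1.modify q 0 fun x => x - 1).getD q 0 = need.getD q 0 - 1
            then sB.2.1 - 1 else sB.2.1)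
          = ↑(List.countP (fun k => decide (need.getD k 0
              ≤ (sB.1.modify q 0 fun x => x - 1).getD k 0)) need.keys) := by
        rw [← sat_step need sB.1 sB.2.1 hnd hsat q hmq _ (-1) (fun x => by omega),
          PySem.Dict.getD_modify, if_pos rfl]
        split_ifs <;> omega
      have hcnd : (((sA.2.modify q 0 fun x => x - 1).values.all fun v => decide (0 ≤ v)) = true)
          ↔ (9 ≤ e.1 ∧ (if (sB.1.modify q 0 fun x => x - 1).getD q 0 = need.getD q 0 - 1
            then sB.2.1 - 1 else sB.2.1) = (need.size : Int)) :=
        ⟨fun hA => ⟨by omega, (cond_iff need _ _ _ hnd hk2 hval2 hsat2).mp hA⟩,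
         fun hB => (cond_iff need _ _ _ hnd hk2 hval2 hsat2).mpr hB.2⟩
      exact ⟨by rw [hans]; exact if_congr hcnd rfl rfl, hk2, hval2, hsat2⟩
    · -- q ∉ need, e.2 ∈ need : only the new product is adjusted
      have hcq : need.contains q = false := by
        rw [PySem.Dict.contains_eq_decide_mem_keys]; simpa using hmq
      have hcp : need.contains e.2 = true := (PySem.Dict.contains_iff_mem_keys _ _).mpr hmp
      simp only [hcq, hcp, if_true, Bool.false_eq_true, if_false]
      have hk2 : (sA.2.modify e.2 0 fun x => x + 1).keys = need.keys := by
        rw [keys_modify_mem sA.2 e.2 (by rw [hkeys]; exact hmp), hkeys]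
      have hval2 : ∀ k, (sA.2.modify e.2 0 fun x => x + 1).getD k 0
          = (sB.1.modify e.2 0 fun x => x + 1).getD k 0 - need.getD k 0 := by
        intro k
        have v1 := hval k
        have v2 := hval e.2
        simp only [PySem.Dict.getD_modify]
        split_ifs with h
        · rw [h]; omega
        · omega
      have hsat2 : (if (sB.1.modify e.2 0 fun x => x + 1).getD e.2 0 = need.getD e.2 0
            then sB.2.1 + 1 else sB.2.1)
          = ↑(List.countP (fun k => decide (need.getD k 0
              ≤ (sB.1.modify e.2 0 fun x => x + 1).getD k 0)) need.keys) := by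
        rw [← sat_step need sB.1 sB.2.1 hnd hsat e.2 hmp _ 1 (fun x => rfl),
          PySem.Dict.getD_modify, if_pos rfl]
        split_ifs <;> omega
      have hcnd : (((sA.2.modify e.2 0 fun x => x + 1).values.all fun v => decide (0 ≤ v)) = true)
          ↔ (9 ≤ e.1 ∧ (if (sB.1.modify e.2 0 fun x => x + 1).getD e.2 0 = need.getD e.2 0
            then sB.2.1 + 1 else sB.2.1) = (need.size : Int)) :=
        ⟨fun hA => ⟨by omega, (cond_iff need _ _ _ hnd hk2 hval2 hsat2).mp hA⟩,
         fun hB => (cond_iff need _ _ _ hnd hk2 hval2 hsat2).mpr hB.2⟩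
      exact ⟨by rw [hans]; exact if_congr hcnd rfl rfl, hk2, hval2, hsat2⟩
    · -- neither product tracked : nothing changes
      have hcq : need.contains q = false := by
        rw [PySem.Dict.contains_eq_decide_mem_keys]; simpa using hmq
      have hcp : need.contains e.2 = false := by
        rw [PySem.Dict.contains_eq_decide_mem_keys]; simpa using hmp
      simp only [hcq, hcp, Bool.false_eq_true, if_false]
      have hcnd : ((sA.2.values.all fun v => decide (0 ≤ v)) = true)
          ↔ (9 ≤ e.1 ∧ sB.2.1 = (need.size : Int)) :=
        ⟨fun hA => ⟨by omega, (cond_iff need _ _ _ hnd hkeys hval hsat).mp hA⟩,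
         fun hB => (cond_iff need _ _ _ hnd hkeys hval hsat).mpr hB.2⟩
      exact ⟨by rw [hans]; exact if_congr hcnd rfl rfl, hkeys, hval, hsat⟩

lemma foldl_inv (need : PySem.Dict String Int) (discount : List String) (hnd : need.keys.Nodup)
    (l : List (Int × String)) (hl : ∀ e ∈ l, 0 ≤ e.1 ∧ e.2 = PySem.List.pyGetD discount e.1 "")
    (sA : Int × PySem.Dict String Int) (sB : PySem.Dict String Int × Int × Int)
    (h : SimInv need sA sB) :
    SimInv need (l.foldl (stepA discount) sA) (l.foldl (fun st e => stepB need discount st e.1) sB) := by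
  induction l generalizing sA sB with
  | nil => exact h
  | cons e l ih =>
    exact ih (fun e' he' => hl e' (List.mem_cons_of_mem _ he'))
      _ _ (step_inv need discount hnd e (hl e (List.mem_cons_self)).1
            (hl e (List.mem_cons_self)).2 sA sB h)

lemma enumerate_mem_spec (xs : List String) (s : Int) (e : Int × String)
    (he : e ∈ PySem.List.enumerate xs s) : ∃ n : Nat, e.1 = s + n ∧ xs[n]? = some e.2 := by
  induction xs generalizing s with
  | nil => simp [PySem.List.enumerate] at he
  | cons x xs ih =>
    rw [PySem.List.enumerate_cons, List.mem_cons] at he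
    rcases he with he | he
    · exact ⟨0, by simp [he]⟩
    · obtain ⟨n, hn1, hn2⟩ := ih (s + 1) he
      exact ⟨n + 1, by push_cast; omega, by simpa using hn2⟩

lemma foldl_neg_get? (l : List (String × Int)) (dc dn : PySem.Dict String Int)
    (h : ∀ k, dc.get? k = (dn.get? k).map (fun v => -v)) (k : String) :
    (l.foldl (fun d pn => d.insert pn.1 (-pn.2)) dc).get? k =
      ((l.foldl (fun d pn => d.insert pn.1 pn.2) dn).get? k).map (fun v => -v) := by
  induction l generalizing dc dn with
  | nil => exact h k
  | cons pn l ih =>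
    exact ih _ _ (fun k' => by
      rw [PySem.Dict.get?_insert, PySem.Dict.get?_insert]
      split <;> simp [h])

lemma init_get? (want : List String) (number : List Int) (k : String) :
    (cartD want number).get? k = ((needD want number).get? k).map (fun v => -v) := by
  exact foldl_neg_get? (List.zip want number) _ _ (fun k' => by simp [PySem.Dict.get?_empty]) k

lemma init_keys (want : List String) (number : List Int) :
    (cartD want number).keys = (needD want number).keys := by
  have h1 := PySem.Dict.keys_foldl_insert_key (ν := Int) (List.zip want number)
    (fun pn => pn.1) (fun _ pn => -pn.2) PySem.Dict.empty
  have h2 := PySem.Dict.keys_foldl_insert_key (ν := Int) (List.zip want number)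
    (fun pn => pn.1) (fun _ pn => pn.2) PySem.Dict.empty
  unfold cartD needD
  rw [h1, h2]

lemma need_nodup (want : List String) (number : List Int) : (needD want number).keys.Nodup := by
  exact PySem.Dict.nodup_keys_foldl_insert_key (List.zip want number)
    (fun pn => pn.1) (fun _ pn => pn.2) PySem.Dict.empty PySem.Dict.nodup_keys_empty

lemma foldl_insert_zero_getD (l : List String) (d : PySem.Dict String Int)
    (h : ∀ k, d.getD k 0 = 0) (k : String) :
    (l.foldl (fun d p => d.insert p 0) d).getD k 0 = 0 := by
  induction l generalizing d with
  | nil => exact h k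
  | cons x l ih => exact ih _ (fun k' => by rw [PySem.Dict.getD_insert]; split <;> simp [h])

lemma hv_zero (want : List String) (number : List Int) (k : String) :
    (hvD want number).getD k 0 = 0 := by
  exact foldl_insert_zero_getD _ _ (fun k' => by simp [PySem.Dict.getD_empty]) k

lemma init_inv (want : List String) (number : List Int) :
    SimInv (needD want number) (0, cartD want number)
      (hvD want number, satD want number, 0) := by
  refine ⟨rfl, init_keys want number, fun k => ?_, ?_⟩
  · show (cartD want number).getD k 0 = (hvD want number).getD k 0 - (needD want number).getD k 0
    rw [hv_zero, PySem.Dict.getD_eq_get?_getD (cartD want number), init_get?,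
      PySem.Dict.getD_eq_get?_getD (needD want number)]
    cases (needD want number).get? k <;> simp
  · show satD want number = _
    unfold satD
    have := PySem.List.sum_map_ite_one_zero
      (fun k => decide ((needD want number).getD k 0 ≤ (hvD want number).getD k 0))
      (needD want number).keys
    simp only [decide_eq_true_eq] at this
    exact this

-- ===== VERDICT (by name: the statement is the Claim_ definition above) =====
theorem solution_spec : Claim_equal_solution := by
  intro want number discount _
  unfold Spec_solution
  rw [solution_eq, solution_alt_eq]
  have hfst : (PySem.List.enumerate discount).map (·.1) = PySem.List.pyRange 0 (discount.length : Int) 1 := by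
    simpa using PySem.List.map_fst_enumerate discount 0
  have hB : ((PySem.List.pyRange 0 (discount.length : Int) 1).foldl
        (stepB (needD want number) discount) (hvD want number, satD want number, 0))
      = ((PySem.List.enumerate discount).foldl
        (fun st e => stepB (needD want number) discount st e.1)
        (hvD want number, satD want number, 0)) := by
    rw [← hfst, List.foldl_map]
  rw [hB]
  have hinv := foldl_inv (needD want number) discount (need_nodup want number)
    (PySem.List.enumerate discount)
    (fun e he => by
      obtain ⟨n, hn1, hn2⟩ := enumerate_mem_spec discount 0 e he
      constructor
      · omega
      · rw [hn1]
        simp only [zero_add, PySem.List.pyGetD_natCast]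
        simp [List.getD_eq_getElem?_getD, hn2])
    (0, cartD want number) (hvD want number, satD want number, 0)
    (init_inv want number)
  exact hinv.1
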